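-- pv_equiv track=rewrite | github.com/Probst1nator/CLI-Agent | main.py | preprocess_consecutive_sudo_commands
-- ===== SOURCE A (Python) =====
-- def preprocess_consecutive_sudo_commands(code: str) -> str:
--     """Combine consecutive shell commands with sudo to reduce password prompts."""
--     lines = code.strip().split('\n')
--     processed_lines = []
--     shell_commands = []
--     for line in lines:
--         line = line.strip()
--         if line.startswith('!'):
--             shell_commands.append(line[1:])
--         else:
--             if shell_commands:
--                 combined = ' && '.join(shell_commands)
--                 processed_lines.append(f'!{combined}')
--                 shell_commands = []
--             processed_lines.append(line)
--     if shell_commands: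
--         combined = ' && '.join(shell_commands)
--         processed_lines.append(f'!{combined}')
--     return '\n'.join(processed_lines)
-- ===== SOURCE B (Python) =====
-- def preprocess_consecutive_sudo_commands(code: str) -> str:
--     """Combine consecutive shell commands with sudo to reduce password prompts."""
--     out = []
--     for line in reversed(code.strip().split('\n')):
--         line = line.strip()
--         if line.startswith('!') and out and out[0].startswith('!'):
--             out[0] = line + ' && ' + out[0][1:]
--         else:
--             out.insert(0, line)
--     return '\n'.join(out)
-- ===== Notes on version B (the rewrite author's own statement) =====
-- stated objective: alternative
-- what changed: Replaces A's forward accumulate-and-flush loop (separate pending shell_commands buffer flushed on non-! lines and after the loop) with a single backwards pass that merges each '!' line directly into the head of the output when that head is also a '!' line, so no pending buffer or final flush exists.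
import Mathlib
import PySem

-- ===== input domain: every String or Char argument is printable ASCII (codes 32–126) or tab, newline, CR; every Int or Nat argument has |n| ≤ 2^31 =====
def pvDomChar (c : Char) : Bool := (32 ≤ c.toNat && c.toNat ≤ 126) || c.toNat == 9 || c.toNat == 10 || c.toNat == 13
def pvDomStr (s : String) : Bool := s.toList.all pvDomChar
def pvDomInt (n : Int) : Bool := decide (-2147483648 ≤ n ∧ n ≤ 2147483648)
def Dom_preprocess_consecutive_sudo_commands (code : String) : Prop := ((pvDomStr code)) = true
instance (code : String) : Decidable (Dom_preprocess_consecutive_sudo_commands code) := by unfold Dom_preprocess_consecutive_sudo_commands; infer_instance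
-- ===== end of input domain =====

-- B replaces A's forward accumulate-and-flush loop (pending shell_commands buffer, flushed on plain lines and after the loop) by a single backwards pass that merges each '!' line into the head of the output; same return value, same cost (objective: alternative decomposition).

-- ===== PORT A =====
-- one step of A's for-loop; state = (processed_lines, shell_commands)
def pcscAStep (st : List String × List String) (line : String) : List String × List String :=
  let line := PySem.Str.strip line
  if PySem.Str.startswith line "!" then
    (st.1, st.2 ++ [PySem.Str.slice line (some 1) none])
  else
    if st.2 ≠ [] then
      (st.1 ++ ["!" ++ PySem.Str.join " && " st.2] ++ [line], [])
    else
      (st.1 ++ [line], st.2)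

def preprocess_consecutive_sudo_commands (code : String) : String :=
  let lines := (PySem.Str.split? (PySem.Str.strip code) "\n").getD []
  let st := lines.foldl pcscAStep ([], [])
  let processed := if st.2 ≠ [] then st.1 ++ ["!" ++ PySem.Str.join " && " st.2] else st.1
  PySem.Str.join "\n" processed

-- ===== PORT B =====
-- one step of B's backwards loop: merge a '!' line into a '!' head of the output, else prepend
def pcscBStep (line : String) (out : List String) : List String :=
  let line := PySem.Str.strip line
  match out with
  | o :: rest =>
      if PySem.Str.startswith line "!" && PySem.Str.startswith o "!" then
        (line ++ " && " ++ PySem.Str.slice o (some 1) none) :: rest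
      else line :: o :: rest
  | [] => [line]

def preprocess_consecutive_sudo_commands_alt (code : String) : String :=
  let lines := (PySem.Str.split? (PySem.Str.strip code) "\n").getD []
  PySem.Str.join "\n" (lines.foldr pcscBStep [])

-- ===== PRECONDITION & SPEC =====
def Spec_preprocess_consecutive_sudo_commands (code : String) (out : String) : Prop := out = preprocess_consecutive_sudo_commands_alt code
instance (code : String) (out : String) : Decidable (Spec_preprocess_consecutive_sudo_commands code out) := by unfold Spec_preprocess_consecutive_sudo_commands; infer_instance

-- ===== CLAIM (what is proved, stated in full; the proofs are below) =====
def Claim_equal_preprocess_consecutive_sudo_commands : Prop := ∀ (code : String), Dom_preprocess_consecutive_sudo_commands code → Spec_preprocess_consecutive_sudo_commands code (preprocess_consecutive_sudo_commands code)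

-- ===== LEMMAS AND PROOFS =====

def pvTail1 (s : String) : String := PySem.Str.slice s (some 1) none
def pvBang (shell : List String) : String := "!" ++ PySem.Str.join " && " shell

lemma pv_cjoin_append (sep : List Char) (L : List (List Char)) (y : List Char) (h : L ≠ []) :
    PySem.Chars.join sep (L ++ [y]) = PySem.Chars.join sep L ++ sep ++ y := by
  induction L with
  | nil => exact absurd rfl h
  | cons x L ih =>
    cases L with
    | nil => simp [PySem.Chars.join_cons_cons, PySem.Chars.join_singleton]
    | cons x2 L2 =>
      have e1 := PySem.Chars.join_cons_cons sep x x2 (L2 ++ [y])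
      have e2 := PySem.Chars.join_cons_cons sep x x2 L2
      have e3 := ih (by simp)
      simp only [List.cons_append] at *
      rw [e1, e3, e2]
      simp [List.append_assoc]

lemma pv_sw_toList {s : String} (h : PySem.Str.startswith s "!" = true) :
    ∃ t, s.toList = '!' :: t := by
  rw [PySem.Str.startswith_eq, PySem.Chars.startswith_iff] at h
  obtain ⟨t, ht⟩ := h
  exact ⟨t, by rw [← ht]; rfl⟩

lemma pv_tail1_toList (s : String) : (pvTail1 s).toList = s.toList.tail := by
  simp [pvTail1, PySem.Str.toList_slice, PySem.List.slice_from_one]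

lemma pv_bang_toList (shell : List String) :
    (pvBang shell).toList = '!' :: PySem.Chars.join " && ".toList (shell.map String.toList) := by
  simp [pvBang, PySem.Str.toList_join]

lemma pv_bang_single {s : String} (h : PySem.Str.startswith s "!" = true) :
    pvBang [pvTail1 s] = s := by
  obtain ⟨t, ht⟩ := pv_sw_toList h
  rw [← String.toList_inj]
  simp [pv_bang_toList, PySem.Chars.join_singleton, pv_tail1_toList, ht]

lemma pv_sw_append {s : String} (t : String) (h : PySem.Str.startswith s "!" = true) :
    PySem.Str.startswith (s ++ t) "!" = true := by
  obtain ⟨r, hr⟩ := pv_sw_toList h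
  rw [PySem.Str.startswith_eq, PySem.Chars.startswith_iff]
  refine ⟨r ++ t.toList, ?_⟩
  simp [String.toList_append, hr]

lemma pv_tail1_append {s : String} (t : String) (h : PySem.Str.startswith s "!" = true) :
    pvTail1 (s ++ t) = pvTail1 s ++ t := by
  obtain ⟨r, hr⟩ := pv_sw_toList h
  rw [← String.toList_inj]
  simp [pv_tail1_toList, String.toList_append, hr]

lemma pv_bang_singleton (x : String) : pvBang [x] = "!" ++ x := by
  rw [← String.toList_inj]
  simp [pv_bang_toList, PySem.Chars.join_singleton]

lemma pv_bang_merge (shell : List String) (a b : String) :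
    pvBang (shell ++ [a ++ " && " ++ b]) = pvBang ((shell ++ [a]) ++ [b]) := by
  rw [← String.toList_inj]
  cases shell with
  | nil =>
    simp [pv_bang_toList, PySem.Chars.join_singleton, PySem.Chars.join_cons_cons,
      String.toList_append]
  | cons x L =>
    simp only [pv_bang_toList, List.map_append, List.map_cons, List.map_nil]
    rw [pv_cjoin_append _ _ _ (by simp), pv_cjoin_append _ _ _ (by simp),
      pv_cjoin_append _ _ _ (by simp)]
    simp [String.toList_append, List.append_assoc]

def pvFlush (shell : List String) : List String := if shell ≠ [] then [pvBang shell] else []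

def pvTailA : List String → List String → List String
  | shell, [] => pvFlush shell
  | shell, l :: ls =>
    if PySem.Str.startswith (PySem.Str.strip l) "!" then
      pvTailA (shell ++ [pvTail1 (PySem.Str.strip l)]) ls
    else pvFlush shell ++ PySem.Str.strip l :: pvTailA [] ls

def pvMergeS (shell out : List String) : List String :=
  if shell = [] then out
  else
    match out with
    | [] => [pvBang shell]
    | o :: rest =>
        if PySem.Str.startswith o "!" then pvBang (shell ++ [pvTail1 o]) :: rest
        else pvBang shell :: o :: rest

lemma pvfoldA (ls : List String) : ∀ proc shell,
    (if (ls.foldl pcscAStep (proc, shell)).2 ≠ [] then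
      (ls.foldl pcscAStep (proc, shell)).1 ++ ["!" ++ PySem.Str.join " && " (ls.foldl pcscAStep (proc, shell)).2]
     else (ls.foldl pcscAStep (proc, shell)).1)
    = proc ++ pvTailA shell ls := by
  induction ls with
  | nil =>
    intro proc shell
    simp only [List.foldl_nil, pvTailA, pvFlush, pvBang]
    split_ifs <;> simp_all
  | cons l ls ih =>
    intro proc shell
    simp only [List.foldl_cons, pvTailA, pcscAStep]
    by_cases hs : PySem.Str.startswith (PySem.Str.strip l) "!" = true
    · simp only [hs, if_pos]
      rw [ih]
      rfl
    · simp only [hs, Bool.false_eq_true, if_neg, not_false_iff]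
      by_cases hsh : shell = []
      · subst hsh
        simp only [ne_eq, not_true_eq_false, if_neg, not_false_iff]
        rw [ih]
        simp [pvFlush, List.append_assoc]
      · simp only [ne_eq, hsh, not_false_iff, if_pos]
        rw [ih]
        simp [pvFlush, pvBang, hsh, List.append_assoc]

lemma pvMergeS_nil (out : List String) : pvMergeS [] out = out := by
  simp [pvMergeS]

set_option maxHeartbeats 2000000 in
lemma pvkey (ls : List String) : ∀ shell,
    pvTailA shell ls = pvMergeS shell (ls.foldr pcscBStep []) := by
  induction ls with
  | nil =>
    intro shell
    simp only [List.foldr_nil, pvTailA, pvMergeS, pvFlush]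
    split_ifs <;> simp_all
  | cons l ls ih =>
    intro shell
    simp only [List.foldr_cons, pvTailA]
    by_cases hs : PySem.Str.startswith (PySem.Str.strip l) "!" = true
    · -- '!' line
      rw [if_pos hs, ih]
      cases hF : ls.foldr pcscBStep [] with
      | nil =>
        simp only [pcscBStep]
        by_cases hsh : shell = []
        · subst hsh
          simp only [pvMergeS, List.nil_append, if_pos, if_neg, List.cons_ne_nil,
            not_false_iff, reduceIte]
          rw [pv_bang_single hs]
        · simp only [pvMergeS, if_neg hsh, if_neg (by simp [hsh] : ¬ shell ++ [pvTail1 (PySem.Str.strip l)] = [])]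
          rw [if_pos hs]
      | cons o rest =>
        simp only [pcscBStep]
        by_cases ho : PySem.Str.startswith o "!" = true
        · rw [if_pos (by rw [hs, ho]; rfl)]
          have hm : PySem.Str.startswith (PySem.Str.strip l ++ " && " ++ PySem.Str.slice o (some 1) none) "!" = true := by
            rw [String.append_assoc]
            exact pv_sw_append _ hs
          by_cases hsh : shell = []
          · subst hsh
            simp only [pvMergeS, List.nil_append, reduceIte, List.cons_ne_nil, if_neg, not_false_iff]
            rw [if_pos ho]
            congr 1
            have hbm := pv_bang_merge [] (pvTail1 (PySem.Str.strip l)) (pvTail1 o)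
            simp only [List.nil_append] at hbm
            rw [← hbm, pv_bang_singleton, ← String.append_assoc, ← String.append_assoc,
              show ("!" ++ pvTail1 (PySem.Str.strip l) : String) = pvBang [pvTail1 (PySem.Str.strip l)] from (pv_bang_singleton _).symm,
              pv_bang_single hs]
            rfl
          · simp only [pvMergeS, if_neg hsh,
              if_neg (by simp [hsh] : ¬ shell ++ [pvTail1 (PySem.Str.strip l)] = [])]
            rw [if_pos hm, if_pos ho]
            congr 1
            rw [show PySem.Str.slice o (some 1) none = pvTail1 o from rfl,
              String.append_assoc, pv_tail1_append _ hs, ← String.append_assoc]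
            exact (pv_bang_merge shell (pvTail1 (PySem.Str.strip l)) (pvTail1 o)).symm
        · rw [if_neg (by rw [hs]; simp only [Bool.true_and]; exact ho)]
          by_cases hsh : shell = []
          · subst hsh
            simp only [pvMergeS, List.nil_append, reduceIte, List.cons_ne_nil, if_neg, not_false_iff]
            rw [if_neg ho, pv_bang_single hs]
          · simp only [pvMergeS, if_neg hsh,
              if_neg (by simp [hsh] : ¬ shell ++ [pvTail1 (PySem.Str.strip l)] = [])]
            rw [if_pos hs, if_neg ho]
    · -- plain line
      rw [if_neg hs, ih [], pvMergeS_nil]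
      cases hF : ls.foldr pcscBStep [] with
      | nil =>
        simp only [pcscBStep, pvMergeS, pvFlush]
        by_cases hsh : shell = []
        · subst hsh
          simp only [reduceIte, List.nil_append, ne_eq, not_true_eq_false]
        · simp only [hsh, reduceIte, ne_eq, not_false_iff, List.cons_ne_nil]
          rw [if_neg hs]
          simp [hsh]
      | cons o rest =>
        simp only [pcscBStep]
        rw [if_neg (by simp only [Bool.and_eq_true]; rintro ⟨h1, _⟩; exact hs h1)]
        simp only [pvMergeS, pvFlush]
        by_cases hsh : shell = []
        · simp [hsh]
        · simp only [hsh, reduceIte, ne_eq, not_false_iff]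
          rw [if_neg hs]
          simp [hsh]

theorem pv_main (code : String) :
    preprocess_consecutive_sudo_commands code = preprocess_consecutive_sudo_commands_alt code := by
  unfold preprocess_consecutive_sudo_commands preprocess_consecutive_sudo_commands_alt
  have h1 := pvfoldA ((PySem.Str.split? (PySem.Str.strip code) "\n").getD []) [] []
  simp only [List.nil_append] at h1
  dsimp only
  rw [h1, pvkey, pvMergeS_nil]

-- ===== VERDICT (by name: the statement is the Claim_ definition above) =====
theorem preprocess_consecutive_sudo_commands_spec : Claim_equal_preprocess_consecutive_sudo_commands := by
  intro code _
  show preprocess_consecutive_sudo_commands code = preprocess_consecutive_sudo_commands_alt code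
  exact pv_main code
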